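-- pv_equiv track=rewrite | github.com/brian7m3/DRX | drx_main.py | parse_alternate_series_segments
-- ===== SOURCE A (Python) =====
-- def parse_alternate_series_segments(cmd):
--     """
--     Splits an alternate series command of the form P5300RA5400i6000A2801PA9300I into
--     segments: ['P5300R', 'P5400i6000', 'P2801P', 'P9300I']
--     """
--     cmd = cmd.strip()
--     if not cmd.startswith('P'):
--         return []
--     segments = []
--     curr = ''
--     for i, c in enumerate(cmd):
--         if i == 0:   # First char (should be P)
--             curr += c
--         elif c == 'A':
--             segments.append(curr)
--             curr = 'P'
--         else:
--             curr += c
--     if curr: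
--         segments.append(curr)
--     return segments
-- ===== SOURCE B (Python) =====
-- def parse_alternate_series_segments(cmd):
--     cmd = cmd.strip()
--     if not cmd.startswith('P'):
--         return []
--     parts = cmd.split('A')
--     return [parts[0]] + ['P' + p for p in parts[1:]]
-- ===== Notes on version B (the rewrite author's own statement) =====
-- stated objective: simpler
-- what changed: Replaced the character-by-character enumerate loop with its (segments, curr) accumulator state by a single str.split('A') followed by prefixing 'P' to every part after the first.
import Mathlib
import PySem

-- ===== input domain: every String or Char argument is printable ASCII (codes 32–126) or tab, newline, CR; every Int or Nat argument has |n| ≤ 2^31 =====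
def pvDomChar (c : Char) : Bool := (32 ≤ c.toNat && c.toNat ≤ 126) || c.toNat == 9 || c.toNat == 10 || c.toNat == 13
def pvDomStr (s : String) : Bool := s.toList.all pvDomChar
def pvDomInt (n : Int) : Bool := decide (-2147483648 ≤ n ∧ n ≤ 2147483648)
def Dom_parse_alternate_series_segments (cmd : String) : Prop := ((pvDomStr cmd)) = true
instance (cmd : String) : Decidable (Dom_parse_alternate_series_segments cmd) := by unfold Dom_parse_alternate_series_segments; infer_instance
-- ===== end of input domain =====

-- B replaces A's character-by-character accumulator loop with one split on 'A' plus a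
-- 'P'-prefixing pass over the later parts (objective: simpler).

-- ===== PORT A =====
-- the for-loop over enumerate(cmd) with state (segments, curr)
def pvLoopA : List (Int × Char) → List (List Char) → List Char → (List (List Char)) × List Char
  | [], segs, cur => (segs, cur)
  | (i, c) :: rest, segs, cur =>
    if i = 0 then pvLoopA rest segs (cur ++ [c])
    else if c = 'A' then pvLoopA rest (segs ++ [cur]) ['P']
    else pvLoopA rest segs (cur ++ [c])

def parse_alternate_series_segments (cmd : String) : List String :=
  let cmd := PySem.Str.strip cmd
  if ¬ (PySem.Str.startswith cmd "P") then []
  else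
    let r := pvLoopA (PySem.List.enumerate cmd.toList 0) [] []
    let segs := if r.2 ≠ [] then r.1 ++ [r.2] else r.1
    segs.map String.ofList

-- ===== PORT B =====
def parse_alternate_series_segments_alt (cmd : String) : List String :=
  let cmd := PySem.Str.strip cmd
  if ¬ (PySem.Str.startswith cmd "P") then []
  else
    let parts := PySem.Chars.splitOn cmd.toList ['A']
    -- parts[0]: split never returns an empty list, so headI is exact here
    String.ofList parts.headI :: parts.tail.map (fun p => String.ofList ('P' :: p))

-- ===== PRECONDITION & SPEC =====
def Spec_parse_alternate_series_segments (cmd : String) (out : List String) : Prop := out = parse_alternate_series_segments_alt cmd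
instance (cmd : String) (out : List String) : Decidable (Spec_parse_alternate_series_segments cmd out) := by unfold Spec_parse_alternate_series_segments; infer_instance

-- ===== CLAIM (what is proved, stated in full; the proofs are below) =====
def Claim_equal_parse_alternate_series_segments : Prop := ∀ (cmd : String), Dom_parse_alternate_series_segments cmd → Spec_parse_alternate_series_segments cmd (parse_alternate_series_segments cmd)

-- ===== LEMMAS AND PROOFS =====

/-- Structural split-on-'A' used to characterise both ports. -/
def splitA : List Char → List (List Char)
  | [] => [[]]
  | c :: rest =>
    if c = 'A' then [] :: splitA rest
    else
      match splitA rest with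
      | [] => [[c]]  -- unreachable
      | h :: tl => (c :: h) :: tl

theorem splitA_ne_nil (l : List Char) : splitA l ≠ [] := by
  cases l with
  | nil => simp [splitA]
  | cons c rest =>
    simp only [splitA]
    split_ifs
    · simp
    · cases h : splitA rest <;> simp

theorem cons_headI_tail {α : Type} [Inhabited α] (l : List α) (h : l ≠ []) :
    l.headI :: l.tail = l := by
  cases l with
  | nil => exact absurd rfl h
  | cons a b => rfl

theorem dropLast_append_getLastD {α : Type} (a : α) (l : List α) (d : α) :
    (a :: l).dropLast ++ [(a :: l).getLastD d] = a :: l := by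
  induction l generalizing a with
  | nil => simp
  | cons x xs ih =>
    have h1 : (a :: x :: xs).dropLast = a :: (x :: xs).dropLast := rfl
    rw [h1, List.getLastD_cons, List.cons_append]
    rw [show (x :: xs).getLastD a = (x :: xs).getLastD d by
          rw [List.getLastD_cons, List.getLastD_cons]]
    rw [ih x]

theorem splitA_cons_headI_tail (c : Char) (rest : List Char) (h : c ≠ 'A') :
    splitA (c :: rest) = (c :: (splitA rest).headI) :: (splitA rest).tail := by
  simp only [splitA, if_neg h]
  cases hs : splitA rest with
  | nil => exact absurd hs (splitA_ne_nil rest)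
  | cons a b => simp

/-- The segment list A's loop (started with accumulator `cur`) produces over `t`. -/
def segList (t : List Char) (cur : List Char) : List (List Char) :=
  (cur ++ (splitA t).headI) :: (splitA t).tail.map (fun p => 'P' :: p)

theorem loop_spec (t : List Char) (s : Nat) (segs : List (List Char)) (cur : List Char) :
    pvLoopA (PySem.List.enumerate t ((s : Int) + 1)) segs cur =
      (segs ++ (segList t cur).dropLast, (segList t cur).getLastD []) := by
  induction t generalizing s segs cur with
  | nil => simp [PySem.List.enumerate_nil, pvLoopA, segList, splitA]
  | cons c rest ih =>
    rw [PySem.List.enumerate_cons]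
    have hne : (s : Int) + 1 ≠ 0 := by omega
    by_cases hc : c = 'A'
    · subst hc
      simp only [pvLoopA, if_neg hne]
      have := ih (s + 1) (segs ++ [cur]) ['P']
      push_cast at this
      rw [show ((s : Int) + 1 + 1) = ((s : Int) + 1) + 1 by ring] at this
      rw [this]
      have hseg : segList ('A' :: rest) cur = cur :: segList rest ['P'] := by
        simp only [segList, splitA]
        cases hs : splitA rest with
        | nil => exact absurd hs (splitA_ne_nil rest)
        | cons a b => simp
      rw [hseg]
      simp only [if_true]
      obtain ⟨a, b, hl2⟩ : ∃ a b, segList rest ['P'] = a :: b := by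
        cases hx : segList rest ['P'] with
        | nil => simp [segList] at hx
        | cons a b => exact ⟨a, b, rfl⟩
      rw [hl2]
      simp
    · simp only [pvLoopA, if_neg hne, if_neg hc]
      have := ih (s + 1) segs (cur ++ [c])
      push_cast at this
      rw [show ((s : Int) + 1 + 1) = ((s : Int) + 1) + 1 by ring] at this
      rw [this]
      have hseg : segList (c :: rest) cur = segList rest (cur ++ [c]) := by
        simp [segList, splitA_cons_headI_tail c rest hc]
      rw [hseg]

/-- splitOn with the one-char separator 'A' is splitA. -/
theorem go_spec (l : List Char) (fuel : Nat) (cur : List Char) (acc : List (List Char))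
    (hf : l.length ≤ fuel) :
    PySem.Chars.splitOn.go ['A'] fuel l cur acc =
      acc.reverse ++ ((cur.reverse ++ (splitA l).headI) :: (splitA l).tail) := by
  induction l generalizing fuel cur acc with
  | nil =>
    cases fuel <;> simp [PySem.Chars.splitOn.go, splitA]
  | cons c rest ih =>
    cases fuel with
    | zero => simp at hf
    | succ f =>
      simp only [PySem.Chars.splitOn.go]
      by_cases hc : c = 'A'
      · subst hc
        rw [if_pos (by simp)]
        simp only [List.length_cons] at hf
        rw [show List.drop (['A'] : List Char).length ('A' :: rest) = rest by simp]
        rw [ih f [] (List.reverse cur :: acc) (by omega)]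
        simp [splitA, cons_headI_tail _ (splitA_ne_nil rest)]
      · rw [if_neg (by simp [List.isPrefixOf]; exact fun h => hc h.symm)]
        simp only [List.length_cons] at hf
        rw [ih f (c :: cur) acc (by omega)]
        rw [splitA_cons_headI_tail c rest hc]
        simp

theorem splitOn_eq_splitA (l : List Char) :
    PySem.Chars.splitOn l ['A'] = (splitA l).headI :: (splitA l).tail := by
  show PySem.Chars.splitOn.go ['A'] (l.length + 1) l [] [] = _
  rw [go_spec l (l.length + 1) [] [] (by omega)]
  simp

theorem segList_elem_ne_nil (t : List Char) (x : List Char)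
    (hx : x ∈ segList t ['P']) : x ≠ [] := by
  simp only [segList, List.mem_cons, List.mem_map] at hx
  rcases hx with h | ⟨p, _, h⟩ <;> subst h <;> simp

-- ===== VERDICT (by name: the statement is the Claim_ definition above) =====
theorem parse_alternate_series_segments_spec : Claim_equal_parse_alternate_series_segments := by
  intro cmd _
  unfold Spec_parse_alternate_series_segments
  unfold parse_alternate_series_segments parse_alternate_series_segments_alt
  set s := PySem.Str.strip cmd with hs
  by_cases hp : PySem.Str.startswith s "P"
  · simp only [hp, not_true_eq_false, if_false]
    have hpre : ("P" : String).toList <+: s.toList :=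
      (PySem.Chars.startswith_iff s.toList ("P" : String).toList).mp (by simpa using hp)
    obtain ⟨t, ht⟩ := hpre
    have htl : s.toList = 'P' :: t := by simpa using ht.symm
    rw [htl]
    -- A side: first iteration consumes (0,'P'), then loop_spec characterises the rest
    rw [PySem.List.enumerate_cons]
    have h0 : pvLoopA ((0, 'P') :: PySem.List.enumerate t (0 + 1)) [] [] =
        pvLoopA (PySem.List.enumerate t ((0 : Int) + 1)) [] ['P'] := by
      simp [pvLoopA]
    rw [h0, show ((0 : Int) + 1) = ((0 : Nat) : Int) + 1 by norm_num,
        loop_spec t 0 [] ['P']]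
    obtain ⟨a, b, hl⟩ : ∃ a b, segList t ['P'] = a :: b := ⟨_, _, rfl⟩
    have hlast : (segList t ['P']).getLastD [] ≠ [] := by
      apply segList_elem_ne_nil t
      rw [hl, List.getLastD_cons, ← hl, hl]
      exact List.getLastD_mem_cons
    simp only [List.nil_append, if_pos hlast]
    have hfull : (segList t ['P']).dropLast ++ [(segList t ['P']).getLastD []] =
        segList t ['P'] := by
      rw [hl]; exact dropLast_append_getLastD a b []
    rw [hfull]
    -- B side
    rw [splitOn_eq_splitA, splitA_cons_headI_tail 'P' t (by decide)]
    simp [segList, List.map_map, Function.comp_def]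
  · have hx : PySem.Chars.startswith s.toList ['P'] = false := by simpa using hp
    simp [hx]
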